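-- pv_equiv track=rewrite | github.com/AdithyaRajagopalan24/LeetcodeAnswers | 3691-maximum-total-subarray-value-ii/3691-maximum-total-subarray-value-ii.py | maxTotalValue
-- ===== SOURCE A (Python) =====
-- import heapq
-- from typing import List
--
-- class SparseTable:
--     def __init__(self, arr: List[int]):
--         n = len(arr)
--         self.log = [0] * (n + 1)
--         for i in range(2, n + 1):
--             self.log[i] = self.log[i // 2] + 1
--         maxLog = self.log[n] + 1
--
--         self.minTable = [[0] * maxLog for _ in range(n)]
--         self.maxTable = [[0] * maxLog for _ in range(n)]
--
--         for i in range(n):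
--             self.minTable[i][0] = self.maxTable[i][0] = arr[i]
--
--         j = 1
--         while (1 << j) <= n:
--             for i in range(n - (1 << j) + 1):
--                 self.minTable[i][j] = min(
--                     self.minTable[i][j - 1],
--                     self.minTable[i + (1 << (j - 1))][j - 1]
--                 )
--                 self.maxTable[i][j] = max(
--                     self.maxTable[i][j - 1],
--                     self.maxTable[i + (1 << (j - 1))][j - 1]
--                 )
--             j += 1
--
--     def queryMin(self, left: int, right: int) -> int:
--         j = self.log[right - left + 1]
--         return min(self.minTable[left][j], self.minTable[right - (1 << j) + 1][j])
--
--     def queryMax(self, left: int, right: int) -> int: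
--         j = self.log[right - left + 1]
--         return max(self.maxTable[left][j], self.maxTable[right - (1 << j) + 1][j])
--
-- def maxTotalValue(nums: List[int], k: int) -> int:
--     n = len(nums)
--     table = SparseTable(nums)
--     total = 0
--
--     heap = [
--         (-(table.queryMax(0, i) - table.queryMin(0, i)), 0, i)
--         for i in range(n)
--     ]
--     heapq.heapify(heap)
--
--     for _ in range(k):
--         value, left, right = heapq.heappop(heap)
--         total -= value
--         if left + 1 <= right:
--             newValue = table.queryMax(left + 1, right) - table.queryMin(left + 1, right)
--             heapq.heappush(heap, (-newValue, left + 1, right))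
--
--     return total
-- ===== SOURCE B (Python) =====
-- def maxTotalValue(nums, k):
--     # All subarray values in one quadratic sweep with running max/min, then
--     # sort descending and sum the k largest.
--     vals = []
--     for i in range(len(nums)):
--         mx = mn = nums[i]
--         for j in range(i, len(nums)):
--             x = nums[j]
--             mx = max(mx, x)
--             mn = min(mn, x)
--             vals.append(mx - mn)
--     vals.sort(reverse=True)
--     return sum(vals[:max(k, 0)])
-- ===== Notes on version B (the rewrite author's own statement) =====
-- stated objective: simpler
-- what changed: Replaces the sparse-table RMQ plus best-first heap with a plain quadratic sweep that materialises every subarray's (max-min) value via running max/min, then sorts descending and sums the first k.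
import Mathlib
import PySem

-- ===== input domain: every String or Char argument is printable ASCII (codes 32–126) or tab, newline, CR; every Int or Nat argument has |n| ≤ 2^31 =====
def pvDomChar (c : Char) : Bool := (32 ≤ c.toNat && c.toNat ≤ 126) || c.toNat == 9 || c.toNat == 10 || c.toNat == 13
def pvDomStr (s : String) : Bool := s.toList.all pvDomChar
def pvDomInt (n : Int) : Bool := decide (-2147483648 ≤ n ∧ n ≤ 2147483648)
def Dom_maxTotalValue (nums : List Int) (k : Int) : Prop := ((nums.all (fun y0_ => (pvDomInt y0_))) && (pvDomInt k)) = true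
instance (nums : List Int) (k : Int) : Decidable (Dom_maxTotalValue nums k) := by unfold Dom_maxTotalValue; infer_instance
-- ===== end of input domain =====

-- B replaces A's sparse-table RMQ + best-first heap with a quadratic running-max/min
-- sweep over all subarrays followed by a descending sort; same return value.

-- ===== PORT A =====
-- SparseTable.minTable/maxTable, ported as the memoized recurrence the build loops fill
-- (the Python table entries actually read by queryMin/queryMax are exactly these values);
-- self.log[m] = self.log[m // 2] + 1 with log[0] = log[1] = 0 is exactly Nat.log2.
def stMin (arr : List Int) (i : Nat) : Nat → Int
  | 0 => arr.getD i 0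
  | j+1 => min (stMin arr i j) (stMin arr (i + 2^j) j)

def stMax (arr : List Int) (i : Nat) : Nat → Int
  | 0 => arr.getD i 0
  | j+1 => max (stMax arr i j) (stMax arr (i + 2^j) j)

-- queryMin/queryMax; 'right - (1 << j) + 1' is written r + 1 - 2^j (equal on every
-- executed query, where 2^j ≤ r - l + 1 ≤ r + 1).
def qMin (arr : List Int) (l r : Nat) : Int :=
  let j := Nat.log2 (r - l + 1)
  min (stMin arr l j) (stMin arr (r + 1 - 2^j) j)

def qMax (arr : List Int) (l r : Nat) : Int :=
  let j := Nat.log2 (r - l + 1)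
  max (stMax arr l j) (stMax arr (r + 1 - 2^j) j)

-- Python tuple '<' on (value, left, right)
def heapLt (a b : Int × Nat × Nat) : Bool :=
  decide (a.1 < b.1) ||
    (decide (a.1 = b.1) &&
      (decide (a.2.1 < b.2.1) || (decide (a.2.1 = b.2.1) && decide (a.2.2 < b.2.2))))

-- heapq.heappop ported by its contract: remove the least tuple (none = pop from empty heap,
-- i.e. Python's IndexError)
def popMin : List (Int × Nat × Nat) → Option ((Int × Nat × Nat) × List (Int × Nat × Nat))
  | [] => none
  | h :: t =>
    let m := t.foldl (fun acc x => if heapLt x acc then x else acc) h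
    some (m, (h :: t).erase m)

-- the 'for _ in range(k)' pop/push loop
def aLoop (nums : List Int) : Nat → List (Int × Nat × Nat) → Int → Int
  | 0, _, total => total
  | fuel+1, heap, total =>
    match popMin heap with
    | none => total  -- Python raises IndexError here; excluded by Pre_
    | some ((v, l, r), rest) =>
      let total' := total - v
      if l + 1 ≤ r then
        aLoop nums fuel ((-(qMax nums (l+1) r - qMin nums (l+1) r), (l+1, r)) :: rest) total'
      else
        aLoop nums fuel rest total'

def maxTotalValue (nums : List Int) (k : Int) : Int :=
  let n := nums.length
  let heap := (List.range n).map (fun i => (-(qMax nums 0 i - qMin nums 0 i), ((0:Nat), i)))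
  aLoop nums k.toNat heap 0

-- ===== PORT B =====
def maxTotalValue_alt (nums : List Int) (k : Int) : Int :=
  let n := nums.length
  let vals := (List.range n).foldl (fun acc i =>
    let x0 := nums.getD i 0
    ((List.range' i (n - i)).foldl
      (fun (s : Int × Int × List Int) j =>
        let x := nums.getD j 0
        let mx := max s.1 x
        let mn := min s.2.1 x
        (mx, mn, s.2.2 ++ [mx - mn]))
      (x0, x0, acc)).2.2) []
  ((PySem.List.sorted vals (fun x => x) true).take (max k 0).toNat).sum

-- ===== PRECONDITION & SPEC =====
-- A raises IndexError (heappop from an empty heap) exactly when k exceeds the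
-- number n(n+1)/2 of subarrays; Pre_ is precisely the inputs where A returns.
def Pre_maxTotalValue (nums : List Int) (k : Int) : Prop :=
  2 * k ≤ (nums.length : Int) * ((nums.length : Int) + 1)
instance (nums : List Int) (k : Int) : Decidable (Pre_maxTotalValue nums k) := by
  unfold Pre_maxTotalValue; infer_instance

def pvWitness_maxTotalValue : List Int × Int := ([3, 1, 2], 4)

def Spec_maxTotalValue (nums : List Int) (k : Int) (out : Int) : Prop := out = maxTotalValue_alt nums k
instance (nums : List Int) (k : Int) (out : Int) : Decidable (Spec_maxTotalValue nums k out) := by unfold Spec_maxTotalValue; infer_instance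

-- ===== CLAIM (what is proved, stated in full; the proofs are below) =====
def Claim_equal_maxTotalValue : Prop := ∀ (nums : List Int) (k : Int), Dom_maxTotalValue nums k → Pre_maxTotalValue nums k → Spec_maxTotalValue nums k (maxTotalValue nums k)

-- ===== LEMMAS AND PROOFS =====

-- getD view of the array
def gD (nums : List Int) (t : Nat) : Int := nums.getD t 0

-- semantic range max / min over indices [l, r] (total; junk when r < l)
def sMax (nums : List Int) (l r : Nat) : Int :=
  (List.range' (l+1) (r - l)).foldl (fun a t => max a (gD nums t)) (gD nums l)
def sMin (nums : List Int) (l r : Nat) : Int :=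
  (List.range' (l+1) (r - l)).foldl (fun a t => min a (gD nums t)) (gD nums l)
def vAl (nums : List Int) (l r : Nat) : Int := sMax nums l r - sMin nums l r

-- ---- generic fold-max / fold-min facts ----
theorem fm_init (nums : List Int) (L : List Nat) : ∀ (a b : Int),
    L.foldl (fun x t => max x (gD nums t)) (max a b)
      = max a (L.foldl (fun x t => max x (gD nums t)) b) := by
  induction L with
  | nil => intro a b; rfl
  | cons h t ih => intro a b; simp only [List.foldl_cons, max_assoc]; exact ih a (max b (gD nums h))

theorem fn_init (nums : List Int) (L : List Nat) : ∀ (a b : Int),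
    L.foldl (fun x t => min x (gD nums t)) (min a b)
      = min a (L.foldl (fun x t => min x (gD nums t)) b) := by
  induction L with
  | nil => intro a b; rfl
  | cons h t ih => intro a b; simp only [List.foldl_cons, min_assoc]; exact ih a (min b (gD nums h))

theorem fm_ge (nums : List Int) (L : List Nat) (b : Int) :
    b ≤ L.foldl (fun x t => max x (gD nums t)) b := by
  cases L with
  | nil => simp
  | cons h t =>
    simp only [List.foldl_cons]
    rw [fm_init nums t b (gD nums h)]
    exact le_max_left _ _

theorem fn_le (nums : List Int) (L : List Nat) (b : Int) :
    L.foldl (fun x t => min x (gD nums t)) b ≤ b := by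
  cases L with
  | nil => simp
  | cons h t =>
    simp only [List.foldl_cons]
    rw [fn_init nums t b (gD nums h)]
    exact min_le_left _ _

theorem fm_mem (nums : List Int) (L : List Nat) : ∀ (b : Int) (t : Nat), t ∈ L →
    gD nums t ≤ L.foldl (fun x s => max x (gD nums s)) b := by
  induction L with
  | nil => intro b t ht; cases ht
  | cons h tl ih =>
    intro b t ht
    simp only [List.foldl_cons]
    rcases List.mem_cons.mp ht with rfl | ht'
    · rw [max_comm, fm_init nums tl (gD nums t) b]; exact le_max_left _ _
    · exact ih _ t ht'

theorem fn_mem (nums : List Int) (L : List Nat) : ∀ (b : Int) (t : Nat), t ∈ L →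
    L.foldl (fun x s => min x (gD nums s)) b ≤ gD nums t := by
  induction L with
  | nil => intro b t ht; cases ht
  | cons h tl ih =>
    intro b t ht
    simp only [List.foldl_cons]
    rcases List.mem_cons.mp ht with rfl | ht'
    · rw [min_comm, fn_init nums tl (gD nums t) b]; exact min_le_left _ _
    · exact ih _ t ht'

theorem fm_attained (nums : List Int) (L : List Nat) : ∀ (b : Int),
    L.foldl (fun x t => max x (gD nums t)) b = b ∨
      ∃ t ∈ L, L.foldl (fun x t => max x (gD nums t)) b = gD nums t := by
  induction L with
  | nil => intro b; exact Or.inl rfl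
  | cons h tl ih =>
    intro b
    simp only [List.foldl_cons]
    rw [fm_init nums tl b (gD nums h)]
    rcases max_choice b (tl.foldl (fun x t => max x (gD nums t)) (gD nums h)) with hc | hc
    · exact Or.inl hc
    · rcases ih (gD nums h) with h2 | ⟨t, ht, h2⟩
      · exact Or.inr ⟨h, List.mem_cons_self .., by rw [hc, h2]⟩
      · exact Or.inr ⟨t, List.mem_cons_of_mem _ ht, by rw [hc, h2]⟩

theorem fn_attained (nums : List Int) (L : List Nat) : ∀ (b : Int),
    L.foldl (fun x t => min x (gD nums t)) b = b ∨
      ∃ t ∈ L, L.foldl (fun x t => min x (gD nums t)) b = gD nums t := by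
  induction L with
  | nil => intro b; exact Or.inl rfl
  | cons h tl ih =>
    intro b
    simp only [List.foldl_cons]
    rw [fn_init nums tl b (gD nums h)]
    rcases min_choice b (tl.foldl (fun x t => min x (gD nums t)) (gD nums h)) with hc | hc
    · exact Or.inl hc
    · rcases ih (gD nums h) with h2 | ⟨t, ht, h2⟩
      · exact Or.inr ⟨h, List.mem_cons_self .., by rw [hc, h2]⟩
      · exact Or.inr ⟨t, List.mem_cons_of_mem _ ht, by rw [hc, h2]⟩

theorem mem_range1 {s n m : Nat} : m ∈ List.range' s n ↔ s ≤ m ∧ m < s + n := by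
  rw [List.mem_range']
  constructor
  · rintro ⟨i, hi, rfl⟩; omega
  · rintro ⟨h1, h2⟩; exact ⟨m - s, by omega, by omega⟩

-- ---- sMax / sMin facts ----
theorem le_sMax (nums : List Int) {l t r : Nat} (h1 : l ≤ t) (h2 : t ≤ r) :
    gD nums t ≤ sMax nums l r := by
  unfold sMax
  rcases Nat.eq_or_lt_of_le h1 with rfl | hlt
  · exact fm_ge nums _ _
  · exact fm_mem nums _ _ t (mem_range1.mpr ⟨by omega, by omega⟩)

theorem sMin_le (nums : List Int) {l t r : Nat} (h1 : l ≤ t) (h2 : t ≤ r) :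
    sMin nums l r ≤ gD nums t := by
  unfold sMin
  rcases Nat.eq_or_lt_of_le h1 with rfl | hlt
  · exact fn_le nums _ _
  · exact fn_mem nums _ _ t (mem_range1.mpr ⟨by omega, by omega⟩)

theorem sMax_attained (nums : List Int) (l r : Nat) :
    ∃ t, l ≤ t ∧ (t ≤ r ∨ t = l) ∧ sMax nums l r = gD nums t := by
  unfold sMax
  rcases fm_attained nums (List.range' (l+1) (r-l)) (gD nums l) with h | ⟨t, ht, h⟩
  · exact ⟨l, le_refl _, Or.inr rfl, h⟩
  · have := mem_range1.mp ht
    exact ⟨t, by omega, Or.inl (by omega), h⟩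

theorem sMin_attained (nums : List Int) (l r : Nat) :
    ∃ t, l ≤ t ∧ (t ≤ r ∨ t = l) ∧ sMin nums l r = gD nums t := by
  unfold sMin
  rcases fn_attained nums (List.range' (l+1) (r-l)) (gD nums l) with h | ⟨t, ht, h⟩
  · exact ⟨l, le_refl _, Or.inr rfl, h⟩
  · have := mem_range1.mp ht
    exact ⟨t, by omega, Or.inl (by omega), h⟩

theorem sMax_attained' (nums : List Int) {l r : Nat} (h : l ≤ r) :
    ∃ t, l ≤ t ∧ t ≤ r ∧ sMax nums l r = gD nums t := by
  rcases sMax_attained nums l r with ⟨t, h1, h2, h3⟩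
  exact ⟨t, h1, by omega, h3⟩

theorem sMin_attained' (nums : List Int) {l r : Nat} (h : l ≤ r) :
    ∃ t, l ≤ t ∧ t ≤ r ∧ sMin nums l r = gD nums t := by
  rcases sMin_attained nums l r with ⟨t, h1, h2, h3⟩
  exact ⟨t, h1, by omega, h3⟩

theorem sMax_mono (nums : List Int) {a l r : Nat} (h1 : a ≤ l) (h2 : l ≤ r) :
    sMax nums l r ≤ sMax nums a r := by
  rcases sMax_attained' nums h2 with ⟨t, ht1, ht2, ht3⟩
  rw [ht3]; exact le_sMax nums (by omega) ht2

theorem sMin_mono (nums : List Int) {a l r : Nat} (h1 : a ≤ l) (h2 : l ≤ r) :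
    sMin nums a r ≤ sMin nums l r := by
  rcases sMin_attained' nums h2 with ⟨t, ht1, ht2, ht3⟩
  rw [ht3]; exact sMin_le nums (by omega) ht2

theorem vAl_mono (nums : List Int) {a l r : Nat} (h1 : a ≤ l) (h2 : l ≤ r) :
    vAl nums l r ≤ vAl nums a r := by
  unfold vAl
  have := sMax_mono nums h1 h2
  have := sMin_mono nums h1 h2
  omega

theorem sMax_self (nums : List Int) (l : Nat) : sMax nums l l = gD nums l := by
  unfold sMax; simp

theorem sMin_self (nums : List Int) (l : Nat) : sMin nums l l = gD nums l := by
  unfold sMin; simp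

theorem sMax_cons (nums : List Int) {l r : Nat} (h : l < r) :
    sMax nums l r = max (gD nums l) (sMax nums (l+1) r) := by
  unfold sMax
  have h1 : r - l = (r - (l+1)) + 1 := by omega
  rw [h1, List.range'_succ, List.foldl_cons]
  exact fm_init nums _ (gD nums l) (gD nums (l+1))

theorem sMin_cons (nums : List Int) {l r : Nat} (h : l < r) :
    sMin nums l r = min (gD nums l) (sMin nums (l+1) r) := by
  unfold sMin
  have h1 : r - l = (r - (l+1)) + 1 := by omega
  rw [h1, List.range'_succ, List.foldl_cons]
  exact fn_init nums _ (gD nums l) (gD nums (l+1))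

theorem sMax_cover (nums : List Int) {a b c d : Nat}
    (h1 : a ≤ c) (h2 : c ≤ b + 1) (h3 : a ≤ b) (h4 : c ≤ d) (h5 : b ≤ d) :
    max (sMax nums a b) (sMax nums c d) = sMax nums a d := by
  apply le_antisymm
  · apply max_le
    · rcases sMax_attained' nums h3 with ⟨t, t1, t2, t3⟩
      rw [t3]; exact le_sMax nums t1 (by omega)
    · rcases sMax_attained' nums h4 with ⟨t, t1, t2, t3⟩
      rw [t3]; exact le_sMax nums (by omega) t2
  · rcases sMax_attained' nums (show a ≤ d by omega) with ⟨t, t1, t2, t3⟩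
    rw [t3]
    by_cases ht : t ≤ b
    · exact le_trans (le_sMax nums t1 ht) (le_max_left _ _)
    · exact le_trans (le_sMax nums (by omega) t2) (le_max_right _ _)

theorem sMin_cover (nums : List Int) {a b c d : Nat}
    (h1 : a ≤ c) (h2 : c ≤ b + 1) (h3 : a ≤ b) (h4 : c ≤ d) (h5 : b ≤ d) :
    min (sMin nums a b) (sMin nums c d) = sMin nums a d := by
  apply le_antisymm
  · rcases sMin_attained' nums (show a ≤ d by omega) with ⟨t, t1, t2, t3⟩
    rw [t3]
    by_cases ht : t ≤ b
    · exact le_trans (min_le_left _ _) (sMin_le nums t1 ht)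
    · exact le_trans (min_le_right _ _) (sMin_le nums (by omega) t2)
  · apply le_min
    · rcases sMin_attained' nums h3 with ⟨t, t1, t2, t3⟩
      rw [t3]; exact sMin_le nums t1 (by omega)
    · rcases sMin_attained' nums h4 with ⟨t, t1, t2, t3⟩
      rw [t3]; exact sMin_le nums (by omega) t2

-- ---- sparse table correctness ----
theorem stMax_eq (nums : List Int) : ∀ (j i : Nat), stMax nums i j = sMax nums i (i + 2^j - 1) := by
  intro j
  induction j with
  | zero => intro i; simp [stMax, sMax_self, gD]
  | succ j ih =>
    intro i
    have h2 : 1 ≤ 2^j := Nat.one_le_two_pow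
    have hp : 2^(j+1) = 2^j + 2^j := by rw [pow_succ]; omega
    rw [show stMax nums i (j+1) = max (stMax nums i j) (stMax nums (i + 2^j) j) from rfl,
        ih i, ih (i + 2^j)]
    rw [sMax_cover nums (a := i) (b := i + 2^j - 1) (c := i + 2^j) (d := i + 2^j + 2^j - 1)
        (by omega) (by omega) (by omega) (by omega) (by omega)]
    congr 1
    omega

theorem stMin_eq (nums : List Int) : ∀ (j i : Nat), stMin nums i j = sMin nums i (i + 2^j - 1) := by
  intro j
  induction j with
  | zero => intro i; simp [stMin, sMin_self, gD]
  | succ j ih =>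
    intro i
    have h2 : 1 ≤ 2^j := Nat.one_le_two_pow
    have hp : 2^(j+1) = 2^j + 2^j := by rw [pow_succ]; omega
    rw [show stMin nums i (j+1) = min (stMin nums i j) (stMin nums (i + 2^j) j) from rfl,
        ih i, ih (i + 2^j)]
    rw [sMin_cover nums (a := i) (b := i + 2^j - 1) (c := i + 2^j) (d := i + 2^j + 2^j - 1)
        (by omega) (by omega) (by omega) (by omega) (by omega)]
    congr 1
    omega

theorem qMax_eq (nums : List Int) (l r : Nat) (h : l ≤ r) : qMax nums l r = sMax nums l r := by
  show max (stMax nums l (Nat.log2 (r - l + 1)))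
      (stMax nums (r + 1 - 2 ^ Nat.log2 (r - l + 1)) (Nat.log2 (r - l + 1))) = sMax nums l r
  have hlen : r - l + 1 ≠ 0 := by omega
  have h1 : 2 ^ Nat.log2 (r - l + 1) ≤ r - l + 1 := Nat.log2_self_le hlen
  have h2 : r - l + 1 < 2 ^ (Nat.log2 (r - l + 1) + 1) := Nat.lt_log2_self
  have h3 : 1 ≤ 2 ^ Nat.log2 (r - l + 1) := Nat.one_le_two_pow
  have hp : 2 ^ (Nat.log2 (r - l + 1) + 1) = 2 ^ Nat.log2 (r - l + 1) + 2 ^ Nat.log2 (r - l + 1) := by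
    rw [pow_succ]; omega
  rw [stMax_eq nums _ l, stMax_eq nums _ (r + 1 - 2 ^ Nat.log2 (r - l + 1))]
  have he : r + 1 - 2 ^ Nat.log2 (r - l + 1) + 2 ^ Nat.log2 (r - l + 1) - 1 = r := by omega
  rw [he]
  exact sMax_cover nums (by omega) (by omega) (by omega) (by omega) (by omega)

theorem qMin_eq (nums : List Int) (l r : Nat) (h : l ≤ r) : qMin nums l r = sMin nums l r := by
  show min (stMin nums l (Nat.log2 (r - l + 1)))
      (stMin nums (r + 1 - 2 ^ Nat.log2 (r - l + 1)) (Nat.log2 (r - l + 1))) = sMin nums l r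
  have hlen : r - l + 1 ≠ 0 := by omega
  have h1 : 2 ^ Nat.log2 (r - l + 1) ≤ r - l + 1 := Nat.log2_self_le hlen
  have h2 : r - l + 1 < 2 ^ (Nat.log2 (r - l + 1) + 1) := Nat.lt_log2_self
  have h3 : 1 ≤ 2 ^ Nat.log2 (r - l + 1) := Nat.one_le_two_pow
  have hp : 2 ^ (Nat.log2 (r - l + 1) + 1) = 2 ^ Nat.log2 (r - l + 1) + 2 ^ Nat.log2 (r - l + 1) := by
    rw [pow_succ]; omega
  rw [stMin_eq nums _ l, stMin_eq nums _ (r + 1 - 2 ^ Nat.log2 (r - l + 1))]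
  have he : r + 1 - 2 ^ Nat.log2 (r - l + 1) + 2 ^ Nat.log2 (r - l + 1) - 1 = r := by omega
  rw [he]
  exact sMin_cover nums (by omega) (by omega) (by omega) (by omega) (by omega)

-- ---- heap order facts ----
theorem heapLt_iff (a b : Int × Nat × Nat) : heapLt a b = true ↔
    (a.1 < b.1 ∨ (a.1 = b.1 ∧ (a.2.1 < b.2.1 ∨ (a.2.1 = b.2.1 ∧ a.2.2 < b.2.2)))) := by
  simp [heapLt]

theorem heapLt_irrefl (a : Int × Nat × Nat) : ¬ heapLt a a = true := by
  rw [heapLt_iff]; omega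

theorem heapLt_trans {a b c : Int × Nat × Nat}
    (h1 : heapLt a b = true) (h2 : heapLt b c = true) : heapLt a c = true := by
  rw [heapLt_iff] at *; omega

theorem heapLt_le_trans {a b c : Int × Nat × Nat}
    (h1 : ¬ heapLt a b = true) (h2 : ¬ heapLt b c = true) : ¬ heapLt a c = true := by
  rw [heapLt_iff] at *; omega

theorem pick_mem (t : List (Int × Nat × Nat)) : ∀ (h : Int × Nat × Nat),
    t.foldl (fun acc x => if heapLt x acc then x else acc) h ∈ h :: t := by
  induction t with
  | nil => intro h; exact List.mem_cons_self ..
  | cons y tl ih =>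
    intro h
    simp only [List.foldl_cons]
    rcases List.mem_cons.mp (ih (if heapLt y h then y else h)) with he | ht
    · rw [he]
      by_cases hc : heapLt y h = true
      · simp [hc]
      · simp [hc]
    · exact List.mem_cons_of_mem _ (List.mem_cons_of_mem _ ht)

theorem pick_min (t : List (Int × Nat × Nat)) : ∀ (h : Int × Nat × Nat),
    ∀ x ∈ h :: t, ¬ heapLt x (t.foldl (fun acc x => if heapLt x acc then x else acc) h) = true := by
  induction t with
  | nil =>
    intro h x hx
    rcases List.mem_cons.mp hx with rfl | hx'
    · exact heapLt_irrefl _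
    · cases hx'
  | cons y tl ih =>
    intro h x hx
    simp only [List.foldl_cons]
    have hpickmem : (if heapLt y h then y else h) ∈ [y, h] := by
      by_cases hc : heapLt y h = true <;> simp [hc]
    rcases List.mem_cons.mp hx with heq | hx'
    · -- x = h
      rw [heq]
      by_cases hc : heapLt y h = true
      · rw [if_pos hc]
        have hy := ih y y (List.mem_cons_self ..)
        intro hcon
        exact hy (heapLt_trans hc hcon)
      · rw [if_neg hc]
        exact ih h h (List.mem_cons_self ..)
    · rcases List.mem_cons.mp hx' with heq | hx''
      · -- x = y
        rw [heq]
        by_cases hc : heapLt y h = true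
        · rw [if_pos hc]
          exact ih y y (List.mem_cons_self ..)
        · rw [if_neg hc]
          have hh := ih h h (List.mem_cons_self ..)
          exact heapLt_le_trans hc hh
      · by_cases hc : heapLt y h = true
        · rw [if_pos hc]; exact ih y x (List.mem_cons_of_mem _ hx'')
        · rw [if_neg hc]; exact ih h x (List.mem_cons_of_mem _ hx'')

theorem popMin_spec (heap : List (Int × Nat × Nat)) (hne : heap ≠ []) :
    ∃ m, popMin heap = some (m, heap.erase m) ∧ m ∈ heap ∧
      ∀ x ∈ heap, ¬ heapLt x m = true := by
  cases heap with
  | nil => exact absurd rfl hne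
  | cons h t =>
    exact ⟨t.foldl (fun acc x => if heapLt x acc then x else acc) h, rfl, pick_mem t h, pick_min t h⟩

-- ---- frontier abstraction ----
def eF (nums : List Int) (p : Nat × Nat) : Int × Nat × Nat := (-(vAl nums p.1 p.2), p.1, p.2)

theorem eF_inj (nums : List Int) : Function.Injective (eF nums) := by
  intro p q h
  simp only [eF, Prod.mk.injEq] at h
  exact Prod.ext h.2.1 h.2.2

def remL (nums : List Int) (F : List (Nat × Nat)) : List Int :=
  F.flatMap (fun p => (List.range' p.1 (p.2 + 1 - p.1)).map (fun l' => vAl nums l' p.2))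

theorem remL_perm (nums : List Int) {F G : List (Nat × Nat)} (h : F.Perm G) :
    (remL nums F).Perm (remL nums G) :=
  List.Perm.flatMap h (fun _ _ => List.Perm.refl _)

-- ---- top-k sum ----
def topSum (t : Nat) (M : List Int) : Int :=
  ((PySem.List.sorted M (fun x => x) true).take t).sum

theorem sortedRev_eq_of_perm {M N : List Int} (h : M.Perm N) :
    PySem.List.sorted M (fun x => x) true = PySem.List.sorted N (fun x => x) true := by
  apply List.Perm.eq_of_pairwise (le := fun a b : Int => b ≤ a)
  · intro a b _ _ h1 h2; omega
  · exact PySem.List.sorted_pairwise_rev M (fun x => x)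
  · exact PySem.List.sorted_pairwise_rev N (fun x => x)
  · exact ((PySem.List.sorted_perm M _ true).trans h).trans (PySem.List.sorted_perm N _ true).symm

theorem topSum_perm (t : Nat) {M N : List Int} (h : M.Perm N) : topSum t M = topSum t N := by
  unfold topSum; rw [sortedRev_eq_of_perm h]

theorem topSum_cons_max (s : Nat) (v : Int) (M : List Int) (hmax : ∀ x ∈ M, x ≤ v) :
    topSum (s+1) (v :: M) = v + topSum s M := by
  unfold topSum
  have hsorted : PySem.List.sorted (v :: M) (fun x => x) true
      = v :: PySem.List.sorted M (fun x => x) true := by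
    apply List.Perm.eq_of_pairwise (le := fun a b : Int => b ≤ a)
    · intro a b _ _ h1 h2; omega
    · exact PySem.List.sorted_pairwise_rev (v :: M) (fun x => x)
    · rw [List.pairwise_cons]
      refine ⟨?_, PySem.List.sorted_pairwise_rev M (fun x => x)⟩
      intro x hx
      exact hmax x ((PySem.List.sorted_perm M _ true).mem_iff.mp hx)
    · exact (PySem.List.sorted_perm (v :: M) _ true).trans
        ((PySem.List.sorted_perm M _ true).symm.cons v)
  rw [hsorted, List.take_succ_cons, List.sum_cons]

-- ---- the heap loop computes the top-k sum ----
theorem aLoop_spec (nums : List Int) : ∀ (fuel : Nat) (F : List (Nat × Nat)) (total : Int),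
    (∀ p ∈ F, p.1 ≤ p.2) →
    fuel ≤ (remL nums F).length →
    aLoop nums fuel (F.map (eF nums)) total = total + topSum fuel (remL nums F) := by
  intro fuel
  induction fuel with
  | zero => intro F total _ _; simp [aLoop, topSum]
  | succ fuel ih =>
    intro F total hval hlen
    have hFne : F ≠ [] := by
      intro h; subst h; simp [remL] at hlen
    obtain ⟨m, hpop, hmem, hmin⟩ := popMin_spec (F.map (eF nums))
      (by simpa using hFne)
    obtain ⟨p, hpF, hpe⟩ := List.mem_map.mp hmem
    subst hpe
    obtain ⟨l, r⟩ := p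
    have hlr : l ≤ r := hval (l, r) hpF
    have hrest : (F.map (eF nums)).erase (eF nums (l, r)) = (F.erase (l, r)).map (eF nums) :=
      (List.map_erase (eF_inj nums) F).symm
    -- value popped is the max of the remaining multiset
    have hvmax : ∀ x ∈ remL nums F, x ≤ vAl nums l r := by
      intro x hx
      obtain ⟨q, hqF, hxq⟩ := List.mem_flatMap.mp hx
      obtain ⟨l', hl', rfl⟩ := List.mem_map.mp hxq
      have hq : q.1 ≤ q.2 := hval q hqF
      have hb := mem_range1.mp hl'
      have step1 : vAl nums l' q.2 ≤ vAl nums q.1 q.2 := vAl_mono nums (by omega) (by omega)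
      have step2 : vAl nums q.1 q.2 ≤ vAl nums l r := by
        have hq' := hmin (eF nums q) (List.mem_map_of_mem hqF)
        rw [heapLt_iff] at hq'
        simp only [eF] at hq'
        omega
      omega
    -- remaining multiset evolves by removing the popped max
    have hchunk : (List.range' l (r + 1 - l)).map (fun l' => vAl nums l' r)
        = vAl nums l r :: (List.range' (l+1) (r + 1 - (l+1))).map (fun l' => vAl nums l' r) := by
      have h1 : r + 1 - l = (r + 1 - (l+1)) + 1 := by omega
      rw [h1, List.range'_succ, List.map_cons]
    have hpermF : F.Perm ((l, r) :: F.erase (l, r)) := List.perm_cons_erase hpF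
    -- the two branches
    have hstep : aLoop nums (fuel+1) (F.map (eF nums)) total
        = (if l + 1 ≤ r then
            aLoop nums fuel ((-(qMax nums (l+1) r - qMin nums (l+1) r), (l+1, r)) ::
              (F.erase (l, r)).map (eF nums)) (total - (-(vAl nums l r)))
          else
            aLoop nums fuel ((F.erase (l, r)).map (eF nums)) (total - (-(vAl nums l r)))) := by
      rw [show aLoop nums (fuel+1) (F.map (eF nums)) total
            = match popMin (F.map (eF nums)) with
              | none => total
              | some ((v, l, r), rest) =>
                if l + 1 ≤ r then
                  aLoop nums fuel ((-(qMax nums (l+1) r - qMin nums (l+1) r), (l+1, r)) :: rest)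
                    (total - v)
                else aLoop nums fuel rest (total - v) from rfl]
      rw [hpop, hrest]
      rfl
    by_cases hbr : l + 1 ≤ r
    · rw [hstep, if_pos hbr]
      have hpush : (-(qMax nums (l+1) r - qMin nums (l+1) r), (l+1, r)) = eF nums (l+1, r) := by
        simp only [eF, vAl, qMax_eq nums (l+1) r hbr, qMin_eq nums (l+1) r hbr]
      rw [hpush, show eF nums (l+1, r) :: (F.erase (l, r)).map (eF nums)
            = ((l+1, r) :: F.erase (l, r)).map (eF nums) from rfl]
      have hperm : (remL nums F).Perm (vAl nums l r :: remL nums ((l+1, r) :: F.erase (l, r))) := by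
        refine (remL_perm nums hpermF).trans ?_
        simp only [remL, List.flatMap_cons]
        rw [hchunk]
        rfl
      have hval' : ∀ p ∈ (l+1, r) :: F.erase (l, r), p.1 ≤ p.2 := by
        intro q hq
        rcases List.mem_cons.mp hq with rfl | hq'
        · exact hbr
        · exact hval q (List.mem_of_mem_erase hq')
      have hlen' : fuel ≤ (remL nums ((l+1, r) :: F.erase (l, r))).length := by
        have := hperm.length_eq
        simp at this
        omega
      rw [ih _ _ hval' hlen']
      have hmax' : ∀ x ∈ remL nums ((l+1, r) :: F.erase (l, r)), x ≤ vAl nums l r := by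
        intro x hx
        exact hvmax x (hperm.mem_iff.mpr (List.mem_cons_of_mem _ hx))
      rw [topSum_perm (fuel+1) hperm, topSum_cons_max fuel _ _ hmax']
      ring
    · rw [hstep, if_neg hbr]
      have hlr' : l = r := by omega
      have hperm : (remL nums F).Perm (vAl nums l r :: remL nums (F.erase (l, r))) := by
        refine (remL_perm nums hpermF).trans ?_
        simp only [remL, List.flatMap_cons]
        rw [hchunk]
        have : r + 1 - (l + 1) = 0 := by omega
        rw [this]
        rfl
      have hval' : ∀ p ∈ F.erase (l, r), p.1 ≤ p.2 :=
        fun q hq => hval q (List.mem_of_mem_erase hq)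
      have hlen' : fuel ≤ (remL nums (F.erase (l, r))).length := by
        have := hperm.length_eq
        simp at this
        omega
      rw [ih _ _ hval' hlen']
      have hmax' : ∀ x ∈ remL nums (F.erase (l, r)), x ≤ vAl nums l r := by
        intro x hx
        exact hvmax x (hperm.mem_iff.mpr (List.mem_cons_of_mem _ hx))
      rw [topSum_perm (fuel+1) hperm, topSum_cons_max fuel _ _ hmax']
      ring

-- ---- B's value list ----
theorem inner_fold (nums : List Int) : ∀ (c j : Nat) (mx mn : Int) (acc : List Int),
    ((List.range' j c).foldl
      (fun (s : Int × Int × List Int) t =>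
        (max s.1 (nums.getD t 0), min s.2.1 (nums.getD t 0),
          s.2.2 ++ [max s.1 (nums.getD t 0) - min s.2.1 (nums.getD t 0)]))
      (mx, mn, acc)).2.2
    = acc ++ (List.range' j c).map
        (fun t => max mx (sMax nums j t) - min mn (sMin nums j t)) := by
  intro c
  induction c with
  | zero => intro j mx mn acc; simp
  | succ c ih =>
    intro j mx mn acc
    rw [List.range'_succ, List.foldl_cons, List.map_cons]
    dsimp only
    rw [ih (j+1) (max mx (nums.getD j 0)) (min mn (nums.getD j 0)) _]
    rw [sMax_self, sMin_self, List.append_assoc, List.singleton_append]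
    simp only [gD]
    congr 1
    congr 1
    apply List.map_congr_left
    intro t ht
    have hj : j < t := by have := mem_range1.mp ht; omega
    rw [sMax_cons nums hj, sMin_cons nums hj]
    simp only [gD]
    rw [max_assoc, min_assoc]

theorem outer_fold (nums : List Int) : ∀ (L : List Nat) (acc : List Int),
    L.foldl (fun acc i =>
      ((List.range' i (nums.length - i)).foldl
        (fun (s : Int × Int × List Int) t =>
          (max s.1 (nums.getD t 0), min s.2.1 (nums.getD t 0),
            s.2.2 ++ [max s.1 (nums.getD t 0) - min s.2.1 (nums.getD t 0)]))
        (nums.getD i 0, nums.getD i 0, acc)).2.2) acc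
    = acc ++ L.flatMap (fun i =>
        (List.range' i (nums.length - i)).map (fun j => vAl nums i j)) := by
  intro L
  induction L with
  | nil => intro acc; simp
  | cons i L ih =>
    intro acc
    rw [List.foldl_cons, List.flatMap_cons]
    rw [inner_fold nums (nums.length - i) i (nums.getD i 0) (nums.getD i 0) acc]
    have hchunk : (List.range' i (nums.length - i)).map
        (fun t => max (nums.getD i 0) (sMax nums i t) - min (nums.getD i 0) (sMin nums i t))
        = (List.range' i (nums.length - i)).map (fun j => vAl nums i j) := by
      apply List.map_congr_left
      intro t ht
      have hit : i ≤ t := by have := mem_range1.mp ht; omega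
      rw [show nums.getD i 0 = gD nums i from rfl,
          max_eq_right (le_sMax nums (le_refl i) hit),
          min_eq_right (sMin_le nums (le_refl i) hit)]
      rfl
    rw [hchunk, ih, List.append_assoc]

-- ---- the two index-pair enumerations are permutations of each other ----
def pairsA (n : Nat) : List (Nat × Nat) :=
  (List.range n).flatMap (fun r => (List.range' 0 (r+1)).map (fun l => (l, r)))
def pairsB (n : Nat) : List (Nat × Nat) :=
  (List.range n).flatMap (fun i => (List.range' i (n - i)).map (fun j => (i, j)))

theorem mem_pairsA {n : Nat} {p : Nat × Nat} : p ∈ pairsA n ↔ p.1 ≤ p.2 ∧ p.2 < n := by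
  simp only [pairsA, List.mem_flatMap, List.mem_range, List.mem_map]
  constructor
  · rintro ⟨r, hr, l, hl, rfl⟩
    have := mem_range1.mp hl
    exact ⟨by omega, hr⟩
  · rintro ⟨h1, h2⟩
    exact ⟨p.2, h2, p.1, mem_range1.mpr ⟨by omega, by omega⟩, by rfl⟩

theorem mem_pairsB {n : Nat} {p : Nat × Nat} : p ∈ pairsB n ↔ p.1 ≤ p.2 ∧ p.2 < n := by
  simp only [pairsB, List.mem_flatMap, List.mem_range, List.mem_map]
  constructor
  · rintro ⟨i, hi, j, hj, rfl⟩
    have := mem_range1.mp hj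
    exact ⟨by omega, by omega⟩
  · rintro ⟨h1, h2⟩
    exact ⟨p.1, by omega, p.2, mem_range1.mpr ⟨by omega, by omega⟩, by rfl⟩

theorem nodup_flatMap_key {α β : Type} (L : List α) (g : α → List β) (key : β → α)
    (hL : L.Nodup) (hg : ∀ a ∈ L, (g a).Nodup) (hkey : ∀ a ∈ L, ∀ b ∈ g a, key b = a) :
    (L.flatMap g).Nodup := by
  induction L with
  | nil => simp
  | cons a L ih =>
    rw [List.flatMap_cons]
    apply List.Nodup.append
    · exact hg a (List.mem_cons_self ..)
    · exact ih (List.Nodup.of_cons hL) (fun b hb => hg b (List.mem_cons_of_mem _ hb))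
        (fun b hb => hkey b (List.mem_cons_of_mem _ hb))
    · intro b hb1 hb2
      have h1 : key b = a := hkey a (List.mem_cons_self ..) b hb1
      obtain ⟨a', ha', hb'⟩ := List.mem_flatMap.mp hb2
      have h2 : key b = a' := hkey a' (List.mem_cons_of_mem _ ha') b hb'
      have : a ∉ L := (List.nodup_cons.mp hL).1
      exact this (h1 ▸ h2 ▸ ha')

theorem nodup_pairsA (n : Nat) : (pairsA n).Nodup := by
  apply nodup_flatMap_key _ _ Prod.snd (List.nodup_range)
  · intro r _
    exact List.Nodup.map (fun a b h => (Prod.mk.injEq _ _ _ _ ▸ h : _ ∧ _).1) (List.nodup_range' ..)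
  · intro r _ b hb
    obtain ⟨l, _, rfl⟩ := List.mem_map.mp hb
    rfl

theorem nodup_pairsB (n : Nat) : (pairsB n).Nodup := by
  apply nodup_flatMap_key _ _ Prod.fst (List.nodup_range)
  · intro i _
    exact List.Nodup.map (fun a b h => (Prod.mk.injEq _ _ _ _ ▸ h : _ ∧ _).2) (List.nodup_range' ..)
  · intro i _ b hb
    obtain ⟨j, _, rfl⟩ := List.mem_map.mp hb
    rfl

theorem pairs_perm (n : Nat) : (pairsA n).Perm (pairsB n) := by
  rw [List.perm_ext_iff_of_nodup (nodup_pairsA n) (nodup_pairsB n)]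
  intro p
  rw [mem_pairsA, mem_pairsB]

-- remaining-multiset of the initial frontier, and B's list, as maps over the pairs
theorem remL_init (nums : List Int) (n : Nat) :
    remL nums ((List.range n).map (fun i => ((0:Nat), i)))
      = (pairsA n).map (fun p => vAl nums p.1 p.2) := by
  unfold remL pairsA
  rw [List.flatMap_map, List.map_flatMap]
  have : ∀ r : Nat,
      ((fun p : Nat × Nat => (List.range' p.1 (p.2 + 1 - p.1)).map (fun l' => vAl nums l' p.2))
        ∘ (fun i => ((0:Nat), i))) r
      = ((List.range' 0 (r+1)).map (fun l => ((l : Nat), r))).map (fun p : Nat × Nat => vAl nums p.1 p.2) := by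
    intro r
    simp [Function.comp, List.map_map]
  exact List.flatMap_congr (fun r _ => this r)

theorem valsB_map (nums : List Int) (n : Nat) :
    (List.range n).flatMap (fun i => (List.range' i (n - i)).map (fun j => vAl nums i j))
      = (pairsB n).map (fun p => vAl nums p.1 p.2) := by
  unfold pairsB
  rw [List.map_flatMap]
  apply List.flatMap_congr
  intro i _
  rw [List.map_map]
  rfl

-- size of the initial remaining multiset
theorem remL_init_len (nums : List Int) : ∀ (n : Nat),
    2 * (remL nums ((List.range n).map (fun i => ((0:Nat), i)))).length = n * (n + 1) := by
  intro n
  induction n with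
  | zero => simp [remL]
  | succ n ih =>
    rw [List.range_succ, List.map_append, remL]
    rw [List.flatMap_append]
    rw [List.length_append]
    have h1 : (remL nums ((List.range n).map (fun i => ((0:Nat), i)))).length
        = (List.flatMap (fun p => (List.range' p.1 (p.2 + 1 - p.1)).map (fun l' => vAl nums l' p.2))
            ((List.range n).map (fun i => ((0:Nat), i)))).length := rfl
    rw [← h1]
    simp only [List.map_cons, List.map_nil, List.flatMap_cons, List.flatMap_nil,
      List.append_nil, List.length_map, List.length_range']
    have : n + 1 - 0 = n + 1 := by omega
    rw [this]
    calc 2 * ((remL nums ((List.range n).map (fun i => ((0:Nat), i)))).length + (n + 1))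
        = 2 * (remL nums ((List.range n).map (fun i => ((0:Nat), i)))).length + 2 * (n + 1) := by ring
      _ = n * (n + 1) + 2 * (n + 1) := by rw [ih]
      _ = (n + 1) * (n + 1 + 1) := by ring

-- ===== VERDICT (by name: the statement is the Claim_ definition above) =====
theorem maxTotalValue_spec : Claim_equal_maxTotalValue := by
  intro nums k _ hPre
  unfold Spec_maxTotalValue
  unfold Pre_maxTotalValue at hPre
  -- A side
  have hA : maxTotalValue nums k
      = aLoop nums k.toNat
          ((List.range nums.length).map (fun i => (-(qMax nums 0 i - qMin nums 0 i), ((0:Nat), i)))) 0 := rfl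
  have hmap : (List.range nums.length).map (fun i => (-(qMax nums 0 i - qMin nums 0 i), ((0:Nat), i)))
      = ((List.range nums.length).map (fun i => ((0:Nat), i))).map (eF nums) := by
    rw [List.map_map]
    apply List.map_congr_left
    intro i _
    simp only [Function.comp, eF, vAl, qMax_eq nums 0 i (Nat.zero_le i),
      qMin_eq nums 0 i (Nat.zero_le i)]
  have hval : ∀ p ∈ (List.range nums.length).map (fun i => ((0:Nat), i)), p.1 ≤ p.2 := by
    intro p hp
    obtain ⟨i, _, rfl⟩ := List.mem_map.mp hp
    exact Nat.zero_le i
  have hlenF := remL_init_len nums nums.length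
  have hfuel : k.toNat ≤ (remL nums ((List.range nums.length).map (fun i => ((0:Nat), i)))).length := by
    have hcast : ((nums.length * (nums.length + 1) : Nat) : Int)
        = (nums.length : Int) * ((nums.length : Int) + 1) := by push_cast; ring
    rw [← hcast] at hPre
    omega
  rw [hA, hmap, aLoop_spec nums k.toNat _ 0 hval hfuel, zero_add]
  -- B side
  have hB : maxTotalValue_alt nums k
      = ((PySem.List.sorted
          ((List.range nums.length).foldl (fun acc i =>
            ((List.range' i (nums.length - i)).foldl
              (fun (s : Int × Int × List Int) t =>
                (max s.1 (nums.getD t 0), min s.2.1 (nums.getD t 0),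
                  s.2.2 ++ [max s.1 (nums.getD t 0) - min s.2.1 (nums.getD t 0)]))
              (nums.getD i 0, nums.getD i 0, acc)).2.2) [])
          (fun x => x) true).take (max k 0).toNat).sum := rfl
  rw [hB, outer_fold nums (List.range nums.length) [], List.nil_append]
  have hk : (max k 0).toNat = k.toNat := by omega
  rw [hk]
  show topSum k.toNat _ = topSum k.toNat _
  apply topSum_perm
  rw [remL_init nums nums.length, valsB_map nums nums.length]
  exact ((pairs_perm nums.length).map _)
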